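-- pv_equiv track=rewrite | github.com/khanhdo2000/calibre-web-clone | backend/app/services/email.py | is_kindle_email
-- ===== SOURCE A (Python) =====
-- def is_kindle_email(email: str) -> bool:
--     """Check if email is a valid Kindle email address"""
--     kindle_domains = [
--         "@kindle.com",
--         "@free.kindle.com",
--         "@kindle.cn",  # China
--         "@free.kindle.cn",
--     ]
--     email_lower = email.lower()
--     return any(email_lower.endswith(domain) for domain in kindle_domains)
-- ===== SOURCE B (Python) =====
-- def is_kindle_email(email: str) -> bool:
--     """Check if email is a valid Kindle email address"""
--     lowered = email.lower()
--     if "@" not in lowered: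
--         return False
--     domain = lowered.rsplit("@", 1)[-1]
--     return domain in {"kindle.com", "free.kindle.com", "kindle.cn", "free.kindle.cn"}
-- ===== Notes on version B (the rewrite author's own statement) =====
-- stated objective: idiomatic
-- what changed: Instead of scanning the string once per candidate suffix, B extracts the part after the last at-sign (returning False when the address has none) and tests that single extracted domain for membership in a set of bare domains.
import Mathlib
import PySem

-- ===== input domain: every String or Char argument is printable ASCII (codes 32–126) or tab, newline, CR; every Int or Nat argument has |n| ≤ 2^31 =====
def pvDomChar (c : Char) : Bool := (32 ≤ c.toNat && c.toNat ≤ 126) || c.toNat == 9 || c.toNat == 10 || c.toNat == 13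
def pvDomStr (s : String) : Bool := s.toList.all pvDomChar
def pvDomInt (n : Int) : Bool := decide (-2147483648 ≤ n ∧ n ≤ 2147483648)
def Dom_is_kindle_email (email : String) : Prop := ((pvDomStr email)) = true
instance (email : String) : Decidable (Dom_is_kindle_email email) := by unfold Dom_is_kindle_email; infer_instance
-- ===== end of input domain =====

-- B: parse the part after the last '@' (guarding '@' is present) and look it up in
-- a set of bare domains, instead of testing one suffix per candidate (idiomatic rewrite).


-- ===== PORT A =====
def is_kindle_email (email : String) : Bool :=
  let kindle_domains : List String :=
    ["@kindle.com", "@free.kindle.com", "@kindle.cn", "@free.kindle.cn"]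
  let email_lower := PySem.Str.lower email
  kindle_domains.any (fun domain => PySem.Str.endswith email_lower domain)

-- ===== PORT B =====
-- hand port of lowered.rsplit("@", 1)[-1]: the characters after the LAST '@'
-- (exact whenever '@' occurs in the string, which the guard ensures)
def afterLastAt (l : List Char) : List Char :=
  (l.reverse.takeWhile (fun c => c != '@')).reverse

def is_kindle_email_alt (email : String) : Bool :=
  let lowered := PySem.Str.lower email
  if PySem.Str.isIn "@" lowered then
    let domain := afterLastAt lowered.toList
    PySem.Set.contains
      (PySem.Set.ofList
        ["kindle.com".toList, "free.kindle.com".toList,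
         "kindle.cn".toList, "free.kindle.cn".toList]) domain
  else
    false

-- ===== PRECONDITION & SPEC =====
def Spec_is_kindle_email (email : String) (out : Bool) : Prop := out = is_kindle_email_alt email
instance (email : String) (out : Bool) : Decidable (Spec_is_kindle_email email out) := by unfold Spec_is_kindle_email; infer_instance

-- ===== CLAIM (what is proved, stated in full; the proofs are below) =====
def Claim_equal_is_kindle_email : Prop := ∀ (email : String), Dom_is_kindle_email email → Spec_is_kindle_email email (is_kindle_email email)

-- ===== LEMMAS AND PROOFS =====

-- e ++ ['@'] is a prefix of r  ↔  r contains '@' and its maximal '@'-free prefix is e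
theorem prefix_at_iff (r e : List Char) (he : '@' ∉ e) :
    e ++ ['@'] <+: r ↔ ('@' ∈ r ∧ r.takeWhile (fun c => c != '@') = e) := by
  induction r generalizing e with
  | nil =>
    simp only [List.prefix_nil, List.not_mem_nil, false_and, iff_false]
    intro h
    exact absurd h (by simp)
  | cons c r' ih =>
    rw [List.takeWhile_cons]
    cases e with
    | nil =>
      by_cases hc : c = '@'
      · subst hc; simp
      · simp only [List.nil_append, List.cons_prefix_cons, List.mem_cons]
        simp [hc, Ne.symm hc]
    | cons e0 e' =>
      have he0 : e0 ≠ '@' := fun h => he (by simp [h])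
      have he' : '@' ∉ e' := fun h => he (by simp [h])
      by_cases hc : c = '@'
      · subst hc
        simp only [List.cons_append, List.cons_prefix_cons]
        simp [he0]
      · simp only [List.cons_append, List.cons_prefix_cons, List.mem_cons, ih e' he',
          if_pos (show (c != '@') = true by simp [hc])]
        constructor
        · rintro ⟨rfl, hmem, htw⟩
          exact ⟨Or.inr hmem, by simp [htw]⟩
        · rintro ⟨hmem, htw⟩
          obtain ⟨rfl, htw'⟩ := List.cons_eq_cons.mp htw
          rcases hmem with h | h
          · exact absurd h.symm hc
          · exact ⟨rfl, h, htw'⟩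

-- endswith on the lowered list, characterised through the tail after the last '@'
theorem endswith_at_iff (l d : List Char) (hd : '@' ∉ d) :
    PySem.Chars.endswith l ('@' :: d) = true ↔ ('@' ∈ l ∧ afterLastAt l = d) := by
  rw [PySem.Chars.endswith_iff, ← List.reverse_prefix]
  have h : ('@' :: d).reverse = d.reverse ++ ['@'] := by simp
  rw [h, prefix_at_iff _ _ (by simpa using hd)]
  constructor
  · rintro ⟨hm, ht⟩
    refine ⟨by simpa using hm, ?_⟩
    unfold afterLastAt
    rw [ht]; simp
  · rintro ⟨hm, ht⟩
    refine ⟨by simpa using hm, ?_⟩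
    unfold afterLastAt at ht
    have := congrArg List.reverse ht
    simpa using this

theorem isIn_at_iff (s : String) : PySem.Str.isIn "@" s = true ↔ '@' ∈ s.toList := by
  rw [PySem.Str.isIn_iff_infix, show ("@".toList = ['@']) from by decide]
  constructor
  · rintro ⟨u, v, h⟩
    rw [← h]; simp
  · intro h
    obtain ⟨u, v, h⟩ := List.append_of_mem h
    exact ⟨u, v, by simp [h]⟩

-- ===== VERDICT (by name: the statement is the Claim_ definition above) =====
theorem is_kindle_email_spec : Claim_equal_is_kindle_email := by
  intro email _
  show is_kindle_email email = is_kindle_email_alt email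
  unfold is_kindle_email is_kindle_email_alt
  rw [Bool.eq_iff_iff]
  simp only [List.any_cons, List.any_nil, Bool.or_eq_true, Bool.or_false,
    PySem.Str.endswith_eq]
  set l := (PySem.Str.lower email).toList with hl
  rw [show ("@kindle.com".toList = '@' :: "kindle.com".toList) from by decide,
      show ("@free.kindle.com".toList = '@' :: "free.kindle.com".toList) from by decide,
      show ("@kindle.cn".toList = '@' :: "kindle.cn".toList) from by decide,
      show ("@free.kindle.cn".toList = '@' :: "free.kindle.cn".toList) from by decide,
      endswith_at_iff l "kindle.com".toList (by decide),
      endswith_at_iff l "free.kindle.com".toList (by decide),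
      endswith_at_iff l "kindle.cn".toList (by decide),
      endswith_at_iff l "free.kindle.cn".toList (by decide)]
  by_cases hm : '@' ∈ l
  · rw [if_pos ((isIn_at_iff _).mpr hm)]
    rw [PySem.Set.contains_iff,
        show (PySem.Set.ofList ["kindle.com".toList, "free.kindle.com".toList,
              "kindle.cn".toList, "free.kindle.cn".toList]
           = ["kindle.com".toList, "free.kindle.com".toList,
              "kindle.cn".toList, "free.kindle.cn".toList]) from by decide]
    simp [hm, List.mem_cons]
  · rw [if_neg (by rw [isIn_at_iff]; exact hm)]
    simp [hm]
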